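-- pv_equiv track=rewrite | github.com/tensorflow/tensorflow | tensorflow/python/autograph/tests/loop_with_function_call_test.py | while_with_local_call
-- ===== SOURCE A (Python) =====
-- def while_with_local_call(n):
--
--   def local_fn(x):
--     return x * 3
--
--   i = 0
--   s = 0
--   while i < n:
--     s = s * 10 + local_fn(i)
--     i += 1
--   return s
-- ===== SOURCE B (Python) =====
-- def while_with_local_call(n):
--   s = 0
--   p = 1
--   for i in reversed(range(n)):
--     s += 3 * i * p
--     p *= 10
--   return s
-- ===== Notes on version B (the rewrite author's own statement) =====
-- stated objective: alternative
-- what changed: Replaces the Horner-style accumulator loop (s = s*10 + 3*i, left-to-right) with a positional-weight summation: the indices are traversed right-to-left and each term 3*i is multiplied by a running place-value weight p (1, 10, 100, ...) and added to the total; no running result is ever multiplied by 10.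
import Mathlib
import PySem

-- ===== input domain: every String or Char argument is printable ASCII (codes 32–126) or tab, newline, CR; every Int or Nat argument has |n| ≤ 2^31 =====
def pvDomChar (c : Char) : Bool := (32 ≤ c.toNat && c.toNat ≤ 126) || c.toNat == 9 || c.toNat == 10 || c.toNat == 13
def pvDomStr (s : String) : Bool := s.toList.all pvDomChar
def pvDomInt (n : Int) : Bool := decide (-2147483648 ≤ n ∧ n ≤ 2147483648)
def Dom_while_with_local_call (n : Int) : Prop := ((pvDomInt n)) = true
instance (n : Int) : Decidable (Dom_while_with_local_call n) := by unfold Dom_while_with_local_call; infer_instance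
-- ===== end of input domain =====

-- B replaces A's Horner-style accumulator loop with a right-to-left positional-weight summation.

-- ===== PORT A =====
-- the while loop of A: state (i, s); local_fn x = x * 3
def pvLoopA (n i s : Int) : Int :=
  if _h : i < n then pvLoopA n (i + 1) (s * 10 + i * 3) else s
termination_by (n - i).toNat
decreasing_by omega

def while_with_local_call (n : Int) : Int := pvLoopA n 0 0

-- ===== PORT B =====
-- for i in reversed(range(n)): s += 3*i*p; p *= 10    (state (s, p), start (0, 1))
def while_with_local_call_alt (n : Int) : Int :=
  ((PySem.List.pyRange 0 n 1).reverse.foldl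
    (fun (sp : Int × Int) i => (sp.1 + 3 * i * sp.2, sp.2 * 10)) (0, 1)).1

-- ===== PRECONDITION & SPEC =====
def Spec_while_with_local_call (n : Int) (out : Int) : Prop := out = while_with_local_call_alt n
instance (n : Int) (out : Int) : Decidable (Spec_while_with_local_call n out) := by unfold Spec_while_with_local_call; infer_instance

-- ===== CLAIM (what is proved, stated in full; the proofs are below) =====
def Claim_equal_while_with_local_call : Prop := ∀ (n : Int), Dom_while_with_local_call n → Spec_while_with_local_call n (while_with_local_call n)

-- ===== LEMMAS AND PROOFS =====

-- A's Horner loop peeled from the RIGHT: the last iteration contributes the units digit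
theorem pvLoopA_peel_right (k : Nat) : ∀ (n i s : Int), (n - i).toNat = k + 1 →
    pvLoopA n i s = pvLoopA (n - 1) i s * 10 + (n - 1) * 3 := by
  induction k with
  | zero =>
      intro n i s h
      rw [pvLoopA, dif_pos (by omega : i < n), pvLoopA, dif_neg (by omega : ¬ i + 1 < n),
        pvLoopA, dif_neg (by omega : ¬ i < n - 1)]
      have : i = n - 1 := by omega
      rw [this]
  | succ k ih =>
      intro n i s h
      rw [pvLoopA, dif_pos (by omega : i < n), ih n (i + 1) (s * 10 + i * 3) (by omega)]
      conv_rhs => rw [pvLoopA, dif_pos (by omega : i < n - 1)]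

-- B's reverse fold computes (a + p · pvLoopA n i 0, p · 10 ^ (n-i))
theorem pvLoopB_eq (k : Nat) : ∀ (n i a p : Int), (n - i).toNat = k →
    (PySem.List.pyRange i n 1).reverse.foldl
      (fun (sp : Int × Int) j => (sp.1 + 3 * j * sp.2, sp.2 * 10)) (a, p)
    = (a + p * pvLoopA n i 0, p * 10 ^ k) := by
  induction k with
  | zero =>
      intro n i a p h
      rw [PySem.List.pyRange_one, show (n - i).toNat = 0 from h, pvLoopA,
        dif_neg (by omega : ¬ i < n)]
      simp
  | succ k ih =>
      intro n i a p h
      have hsplit : PySem.List.pyRange i n 1 = PySem.List.pyRange i (n - 1) 1 ++ [n - 1] := by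
        have := PySem.List.pyRange_one_succ_right (a := i) (b := n - 1) (by omega)
        simpa using this
      rw [hsplit, List.reverse_append, List.reverse_singleton, List.singleton_append,
        List.foldl_cons, ih (n - 1) i (a + 3 * (n - 1) * p) (p * 10) (by omega),
        pvLoopA_peel_right k n i 0 h]
      exact Prod.ext (by ring) (by ring)

-- ===== VERDICT (by name: the statement is the Claim_ definition above) =====
theorem while_with_local_call_spec : Claim_equal_while_with_local_call := by
  intro n _
  unfold Spec_while_with_local_call while_with_local_call while_with_local_call_alt
  rw [pvLoopB_eq (n - 0).toNat n 0 0 1 rfl]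
  ring
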